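-- pv_equiv track=rewrite | github.com/Deven-14/leetcode | 481. Magical String/solution.py | magicalString
-- ===== SOURCE A (Python) =====
-- def magicalString(n: int) -> int:
--     s = "122"
--     freq_idx = 2
--     num = 1
--
--     while len(s) < n:
--         freq = int(s[freq_idx])
--         if num == 1 and freq == 1:
--             s += "1"
--             num = 2
--         elif num == 2 and freq == 2:
--             s += "22"
--             num = 1
--         elif num == 2 and freq == 1:
--             s += "2"
--             num = 1
--         elif num == 1 and freq == 2:
--             s += "11"
--             num = 2
--
--         freq_idx += 1
--
--     return s[:n].count('1')
-- ===== SOURCE B (Python) =====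
-- def magicalString(n: int) -> int:
--     # Staged expansion: the magical string is the fixed point of run-length
--     # decoding, so repeatedly decode the whole current prefix until long enough.
--     s = [1, 2, 2]
--     while len(s) < n:
--         t = []
--         v = 1
--         for run in s:
--             t.extend([v] * run)
--             v = 3 - v
--         s = t
--     return s[:n].count(1)
-- ===== Notes on version B (the rewrite author's own statement) =====
-- stated objective: faster
-- what changed: B drops A's incremental read-pointer generator entirely: it treats the magical string as the fixed point of run-length decoding and repeatedly decodes the whole current prefix in staged passes until it is long enough, instead of appending one run per step while tracking a pointer and a num state; this also replaces A's quadratic string concatenation by list building.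
import Mathlib
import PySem

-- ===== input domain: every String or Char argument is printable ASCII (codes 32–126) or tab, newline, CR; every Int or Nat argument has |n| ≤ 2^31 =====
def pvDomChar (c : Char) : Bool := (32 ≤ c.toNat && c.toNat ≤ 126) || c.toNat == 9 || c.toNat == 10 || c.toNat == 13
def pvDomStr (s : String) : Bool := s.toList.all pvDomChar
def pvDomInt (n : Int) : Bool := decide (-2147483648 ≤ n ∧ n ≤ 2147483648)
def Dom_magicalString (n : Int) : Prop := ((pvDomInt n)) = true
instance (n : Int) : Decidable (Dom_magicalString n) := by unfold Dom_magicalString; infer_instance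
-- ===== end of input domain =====

-- B replaces A's incremental read-pointer generator by staged whole-prefix run-length
-- decoding passes (the magical string is the fixed point of run-length decoding).

-- ===== PORT A =====
-- A's string is carried as its List Char (PySem.Chars layer); each loop iteration mirrors
-- A's body; the `none` arms are where Python would raise (IndexError / ValueError) —
-- unreachable from the initial state, the loop stops there.
def magicalStringLoopA (fuel : Nat) (s : List Char) (freqIdx num n : Int) : List Char :=
  match fuel with
  | 0 => s
  | fuel + 1 =>
    if (s.length : Int) < n then
      match PySem.List.pyGet? s freqIdx with
      | none => s
      | some c =>
        match PySem.Int.ofStr? (String.mk [c]) with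
        | none => s
        | some freq =>
          if num = 1 ∧ freq = 1 then
            magicalStringLoopA fuel (s ++ ['1']) (freqIdx + 1) 2 n
          else if num = 2 ∧ freq = 2 then
            magicalStringLoopA fuel (s ++ ['2', '2']) (freqIdx + 1) 1 n
          else if num = 2 ∧ freq = 1 then
            magicalStringLoopA fuel (s ++ ['2']) (freqIdx + 1) 1 n
          else if num = 1 ∧ freq = 2 then
            magicalStringLoopA fuel (s ++ ['1', '1']) (freqIdx + 1) 2 n
          else
            magicalStringLoopA fuel s (freqIdx + 1) num n
    else s

def magicalString (n : Int) : Int :=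
  let s := magicalStringLoopA n.toNat ['1', '2', '2'] 2 1 n
  (PySem.Chars.count (PySem.List.slice s none (some n)) ['1'] : Int)

-- ===== PORT B =====
-- Source B's inner `for run in s: t.extend([v]*run); v = 3 - v` pass as a fold over s
def pvDecodePass (s : List Int) : List Int :=
  (s.foldl (fun (acc : List Int × Int) run =>
      (acc.1 ++ List.replicate run.toNat acc.2, 3 - acc.2)) ([], 1)).1

-- Source B's while loop: decode the whole current prefix until it is long enough
def magicalStringLoopB (fuel : Nat) (s : List Int) (n : Int) : List Int :=
  match fuel with
  | 0 => s
  | fuel + 1 =>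
    if (s.length : Int) < n then magicalStringLoopB fuel (pvDecodePass s) n else s

def magicalString_alt (n : Int) : Int :=
  let s := magicalStringLoopB n.toNat [1, 2, 2] n
  ((PySem.List.slice s none (some n)).count 1 : Int)

-- ===== PRECONDITION & SPEC =====
def Spec_magicalString (n : Int) (out : Int) : Prop := out = magicalString_alt n
instance (n : Int) (out : Int) : Decidable (Spec_magicalString n out) := by unfold Spec_magicalString; infer_instance

-- ===== CLAIM (what is proved, stated in full; the proofs are below) =====
def Claim_equal_magicalString : Prop := ∀ (n : Int), Dom_magicalString n → Spec_magicalString n (magicalString n)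

-- ===== LEMMAS AND PROOFS =====

-- canonical generator of magical-string prefixes (proof-side only):
-- one run is appended per step, its length read off the list at index k+2
def pvGen : Nat → List Int
  | 0 => [1, 2, 2]
  | k + 1 =>
    let s := pvGen k
    s ++ List.replicate (s.getD (k + 2) 0).toNat (3 - s.getLastD 0)

def pvElem (j : Nat) : Int := (pvGen j).getD j 0
def pvRunVal (j : Nat) : Int := if j % 2 = 0 then 1 else 2
def pvSeg (j : Nat) : List Int := List.replicate (pvElem j).toNat (pvRunVal j)
def pvRuns (a len : Nat) : List Int := (List.range' a len).flatMap pvSeg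

theorem pvGen_ne_nil : ∀ k, pvGen k ≠ [] := by
  intro k
  induction k with
  | zero => simp [pvGen]
  | succ k ih =>
    simp only [pvGen, ne_eq, List.append_eq_nil_iff, not_and]
    intro h
    exact absurd h ih

theorem getLastD_mem (l : List Int) (h : l ≠ []) : l.getLastD 0 ∈ l := by
  rw [List.getLastD_eq_getLast?, List.getLast?_eq_some_getLast h, Option.getD_some]
  exact List.getLast_mem h

theorem pvGen_mem : ∀ k, ∀ x ∈ pvGen k, x = 1 ∨ x = 2 := by
  intro k
  induction k with
  | zero => intro x hx; fin_cases hx <;> norm_num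
  | succ k ih =>
    intro x hx
    simp only [pvGen, List.mem_append] at hx
    rcases hx with h | h
    · exact ih x h
    · have hl := ih _ (getLastD_mem (pvGen k) (pvGen_ne_nil k))
      rw [List.eq_of_mem_replicate h]
      omega

theorem pvGen_len : ∀ k, k + 3 ≤ (pvGen k).length := by
  intro k
  induction k with
  | zero => simp [pvGen]
  | succ k ih =>
    simp only [pvGen, List.length_append, List.length_replicate]
    have hb : k + 2 < (pvGen k).length := by omega
    have hmem : (pvGen k).getD (k + 2) 0 ∈ pvGen k := by
      rw [List.getD_eq_getElem _ _ hb]; exact List.getElem_mem hb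
    have := pvGen_mem k _ hmem
    omega

theorem pvGen_prefix_succ (k : Nat) : pvGen k <+: pvGen (k + 1) := ⟨_, rfl⟩

theorem pvGen_prefix {a b : Nat} (h : a ≤ b) : pvGen a <+: pvGen b := by
  induction b with
  | zero => cases Nat.le_zero.mp h; exact List.prefix_refl _
  | succ b ih =>
    rcases Nat.lt_or_ge a (b + 1) with h' | h'
    · exact (ih (by omega)).trans (pvGen_prefix_succ b)
    · have : a = b + 1 := by omega
      subst this; exact List.prefix_refl _

theorem getD_of_prefix {l l' : List Int} (h : l <+: l') {j : Nat} (hj : j < l.length) :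
    l.getD j 0 = l'.getD j 0 := by
  obtain ⟨t, rfl⟩ := h
  rw [List.getD, List.getD, List.getElem?_append_left hj]

theorem pvGen_getD (k j : Nat) (hj : j < (pvGen k).length) :
    (pvGen k).getD j 0 = pvElem j := by
  rcases Nat.le_total j k with h | h
  · exact (getD_of_prefix (pvGen_prefix h) (by have := pvGen_len j; omega)).symm
  · exact getD_of_prefix (pvGen_prefix h) hj

theorem pvRunVal_succ (j : Nat) : 3 - pvRunVal j = pvRunVal (j + 1) := by
  rcases Nat.mod_two_eq_zero_or_one j with h | h <;>
    simp [pvRunVal, h, Nat.add_mod]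

theorem pvElem_pos (j : Nat) : 1 ≤ (pvElem j).toNat := by
  have hb : j < (pvGen j).length := by have := pvGen_len j; omega
  have hmem : pvElem j ∈ pvGen j := by
    unfold pvElem; rw [List.getD_eq_getElem _ _ hb]; exact List.getElem_mem hb
  have := pvGen_mem j _ hmem
  omega

theorem getLastD_append_replicate (l : List Int) (c : Nat) (hc : 1 ≤ c) (v : Int) :
    (l ++ List.replicate c v).getLastD 0 = v := by
  obtain ⟨c', rfl⟩ : ∃ c', c = c' + 1 := ⟨c - 1, by omega⟩
  rw [List.replicate_succ', ← List.append_assoc, List.getLastD_concat]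

theorem pvRuns_concat (a m : Nat) : pvRuns a (m + 1) = pvRuns a m ++ pvSeg (a + m) := by
  unfold pvRuns
  rw [List.range'_1_concat, List.flatMap_append]
  simp

theorem pvRuns_cons (a m : Nat) : pvRuns a (m + 1) = pvSeg a ++ pvRuns (a + 1) m := by
  unfold pvRuns
  rw [List.range'_succ, List.flatMap_cons]

theorem pvRuns_concat0 (m : Nat) : pvRuns 0 (m + 1) = pvRuns 0 m ++ pvSeg m := by
  simpa using pvRuns_concat 0 m

theorem pvRuns_last (m : Nat) : (pvRuns 0 (m + 1)).getLastD 0 = pvRunVal m := by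
  rw [pvRuns_concat0]
  simpa [pvSeg] using
    getLastD_append_replicate (pvRuns 0 m) _ (pvElem_pos m) (pvRunVal m)

theorem pvGen_eq_runs : ∀ k, pvGen k = pvRuns 0 (k + 2) := by
  intro k
  induction k with
  | zero => decide
  | succ k ih =>
    have hb : k + 2 < (pvGen k).length := by have := pvGen_len k; omega
    show pvGen k ++ List.replicate ((pvGen k).getD (k + 2) 0).toNat
        (3 - (pvGen k).getLastD 0) = pvRuns 0 (k + 3)
    rw [pvGen_getD k (k + 2) hb]
    have hlast : (pvGen k).getLastD 0 = pvRunVal (k + 1) := by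
      rw [ih]; exact pvRuns_last (k + 1)
    rw [hlast, pvRunVal_succ]
    have : pvRuns 0 (k + 3) = pvRuns 0 (k + 2) ++ pvSeg (k + 2) := pvRuns_concat0 (k + 2)
    rw [this, ← ih]
    rfl

-- the decode pass, started at run index a, concatenates the runs a..a+len-1
theorem decode_fold : ∀ (l : List Int) (a : Nat) (acc : List Int),
    (∀ j (h : j < l.length), l[j] = pvElem (a + j)) →
    l.foldl (fun acc run => (acc.1 ++ List.replicate run.toNat acc.2, 3 - acc.2))
        (acc, pvRunVal a)
      = (acc ++ pvRuns a l.length, pvRunVal (a + l.length)) := by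
  intro l
  induction l with
  | nil => intro a acc _; simp [pvRuns]
  | cons h t ih =>
    intro a acc hent
    have h0 : h = pvElem a := by simpa using hent 0 (by simp)
    simp only [List.foldl_cons]
    have step : (acc ++ List.replicate h.toNat (pvRunVal a), 3 - pvRunVal a)
        = (acc ++ pvSeg a, pvRunVal (a + 1)) := by
      rw [h0, pvRunVal_succ]; rfl
    rw [step, ih (a + 1) (acc ++ pvSeg a)
      (by intro j hj; have := hent (j + 1) (by simpa using hj); simpa [Nat.add_assoc,
        Nat.add_comm 1 j] using this)]
    simp only [List.length_cons, pvRuns_cons, List.append_assoc, Prod.mk.injEq]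
    exact ⟨trivial, congrArg pvRunVal (by omega)⟩

theorem decode_gen (k : Nat) :
    pvDecodePass (pvGen k) = pvGen ((pvGen k).length - 2) := by
  have hlen := pvGen_len k
  unfold pvDecodePass
  have h1 : (1 : Int) = pvRunVal 0 := by decide
  rw [h1, decode_fold (pvGen k) 0 []
    (by intro j hj; rw [← List.getD_eq_getElem _ _ hj, pvGen_getD k j hj]; simp)]
  simp only [List.nil_append]
  rw [pvGen_eq_runs ((pvGen k).length - 2)]
  congr 1
  omega

theorem loopB_gen (n : Int) : ∀ (fuel : Nat) (k : Nat),
    n ≤ ((pvGen k).length : Int) + fuel →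
    ∃ k', magicalStringLoopB fuel (pvGen k) n = pvGen k' ∧ n ≤ ((pvGen k').length : Int) := by
  intro fuel
  induction fuel with
  | zero => intro k h; exact ⟨k, rfl, by simpa using h⟩
  | succ fuel ih =>
    intro k h
    by_cases hlt : ((pvGen k).length : Int) < n
    · have hdec := decode_gen k
      have hnew := pvGen_len ((pvGen k).length - 2)
      have hlen := pvGen_len k
      obtain ⟨k', h1, h2⟩ := ih ((pvGen k).length - 2) (by rw [← hdec] at hnew ⊢; omega)
      exact ⟨k', by rw [magicalStringLoopB, if_pos hlt, hdec]; exact h1, h2⟩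
    · exact ⟨k, by rw [magicalStringLoopB, if_neg hlt], by omega⟩

-- the digit character of a symbol (1 ↦ '1', 2 ↦ '2'); proof-side only
def pvToCh (x : Int) : Char := if x = 1 then '1' else '2'

theorem loopA_step (fuel : Nat) (k : Nat) (n : Int)
    (hlt : ((((pvGen k).map pvToCh).length : Nat) : Int) < n) :
    magicalStringLoopA (fuel + 1) ((pvGen k).map pvToCh) ((k : Int) + 2)
        (3 - (pvGen k).getLastD 0) n
      = magicalStringLoopA fuel ((pvGen (k + 1)).map pvToCh) (((k + 1 : Nat) : Int) + 2)
        (3 - (pvGen (k + 1)).getLastD 0) n := by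
  have hb : k + 2 < (pvGen k).length := by have := pvGen_len k; omega
  have hget : PySem.List.pyGet? ((pvGen k).map pvToCh) ((k : Int) + 2)
      = some (pvToCh (pvElem (k + 2))) := by
    rw [PySem.List.pyGet?_of_nonneg _ (by omega)]
    have ht : ((k : Int) + 2).toNat = k + 2 := by omega
    rw [ht, List.getElem?_map, List.getElem?_eq_getElem hb]
    rw [← List.getD_eq_getElem _ _ hb, pvGen_getD k (k + 2) hb]
    rfl
  have hfreq : pvElem (k + 2) = 1 ∨ pvElem (k + 2) = 2 := by
    have hmem : pvElem (k + 2) ∈ pvGen k := by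
      rw [← pvGen_getD k (k + 2) hb, List.getD_eq_getElem _ _ hb]
      exact List.getElem_mem hb
    exact pvGen_mem k _ hmem
  have hnum : (pvGen k).getLastD 0 = 1 ∨ (pvGen k).getLastD 0 = 2 :=
    pvGen_mem k _ (getLastD_mem (pvGen k) (pvGen_ne_nil k))
  have hstepeq : pvGen (k + 1)
      = pvGen k ++ List.replicate (pvElem (k + 2)).toNat (3 - (pvGen k).getLastD 0) := by
    show pvGen k ++ _ = _
    rw [pvGen_getD k (k + 2) hb]
  have hlast' : (pvGen (k + 1)).getLastD 0 = 3 - (pvGen k).getLastD 0 := by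
    rw [hstepeq]
    exact getLastD_append_replicate _ _ (pvElem_pos (k + 2)) _
  have hidx : (k : Int) + 2 + 1 = ((k + 1 : Nat) : Int) + 2 := by push_cast; ring
  have o1 : PySem.Int.ofStr? (String.mk [pvToCh 1]) = some 1 := by decide
  have o2 : PySem.Int.ofStr? (String.mk [pvToCh 2]) = some 2 := by decide
  rw [magicalStringLoopA, if_pos hlt]
  rcases hnum with hv | hv <;> rcases hfreq with hf | hf
  · -- last = 1 (num = 2), next run length 1: branch "num == 2 and freq == 1"
    have hnumv : 3 - (pvGen k).getLastD 0 = 2 := by rw [hv]; norm_num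
    have hnum' : 3 - (pvGen (k + 1)).getLastD 0 = 1 := by rw [hlast', hnumv]; norm_num
    have hmap : (pvGen (k + 1)).map pvToCh = (pvGen k).map pvToCh ++ ['2'] := by
      rw [hstepeq, hf, hnumv, List.map_append]; rfl
    simp only [hget, hf, o1, hnumv]
    rw [if_neg (by norm_num), if_neg (by norm_num), if_pos (by norm_num)]
    rw [hmap, hnum', hidx]
  · -- last = 1 (num = 2), next run length 2: branch "num == 2 and freq == 2"
    have hnumv : 3 - (pvGen k).getLastD 0 = 2 := by rw [hv]; norm_num
    have hnum' : 3 - (pvGen (k + 1)).getLastD 0 = 1 := by rw [hlast', hnumv]; norm_num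
    have hmap : (pvGen (k + 1)).map pvToCh = (pvGen k).map pvToCh ++ ['2', '2'] := by
      rw [hstepeq, hf, hnumv, List.map_append]; rfl
    simp only [hget, hf, o2, hnumv]
    rw [if_neg (by norm_num), if_pos (by norm_num)]
    rw [hmap, hnum', hidx]
  · -- last = 2 (num = 1), next run length 1: branch "num == 1 and freq == 1"
    have hnumv : 3 - (pvGen k).getLastD 0 = 1 := by rw [hv]; norm_num
    have hnum' : 3 - (pvGen (k + 1)).getLastD 0 = 2 := by rw [hlast', hnumv]; norm_num
    have hmap : (pvGen (k + 1)).map pvToCh = (pvGen k).map pvToCh ++ ['1'] := by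
      rw [hstepeq, hf, hnumv, List.map_append]; rfl
    simp only [hget, hf, o1, hnumv]
    rw [if_pos (by norm_num)]
    rw [hmap, hnum', hidx]
  · -- last = 2 (num = 1), next run length 2: branch "num == 1 and freq == 2"
    have hnumv : 3 - (pvGen k).getLastD 0 = 1 := by rw [hv]; norm_num
    have hnum' : 3 - (pvGen (k + 1)).getLastD 0 = 2 := by rw [hlast', hnumv]; norm_num
    have hmap : (pvGen (k + 1)).map pvToCh = (pvGen k).map pvToCh ++ ['1', '1'] := by
      rw [hstepeq, hf, hnumv, List.map_append]; rfl
    simp only [hget, hf, o2, hnumv]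
    rw [if_neg (by norm_num), if_neg (by norm_num), if_neg (by norm_num),
      if_pos (by norm_num)]
    rw [hmap, hnum', hidx]

theorem pvGen_len_succ_lt (k : Nat) : (pvGen k).length < (pvGen (k + 1)).length := by
  have h : (pvGen (k + 1)).length
      = (pvGen k).length + ((pvGen k).getD (k + 2) 0).toNat := by
    simp [pvGen]
  have hb : k + 2 < (pvGen k).length := by have := pvGen_len k; omega
  rw [h, pvGen_getD k (k + 2) hb]
  have := pvElem_pos (k + 2)
  omega

theorem loopA_gen (n : Int) : ∀ (fuel : Nat) (k : Nat),
    n ≤ ((pvGen k).length : Int) + fuel →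
    ∃ k', magicalStringLoopA fuel ((pvGen k).map pvToCh) ((k : Int) + 2)
        (3 - (pvGen k).getLastD 0) n = (pvGen k').map pvToCh ∧
      n ≤ ((pvGen k').length : Int) := by
  intro fuel
  induction fuel with
  | zero => intro k h; exact ⟨k, rfl, by simpa using h⟩
  | succ fuel ih =>
    intro k h
    by_cases hlt : ((((pvGen k).map pvToCh).length : Nat) : Int) < n
    · obtain ⟨k', h1, h2⟩ := ih (k + 1) (by
        have := pvGen_len_succ_lt k
        omega)
      exact ⟨k', by rw [loopA_step fuel k n hlt]; exact h1, h2⟩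
    · refine ⟨k, by rw [magicalStringLoopA, if_neg hlt], ?_⟩
      simp at hlt; omega

-- s.count(c) for a single-character pattern is the character count
theorem go_singleton (c : Char) : ∀ (l : List Char) (acc : Nat),
    PySem.Chars.count.go [c] l.length l acc = acc + l.count c := by
  intro l
  induction l with
  | nil => intro acc; simp [PySem.Chars.count.go]
  | cons h t ih =>
    intro acc
    simp only [List.length_cons, PySem.Chars.count.go, List.isPrefixOf]
    by_cases hc : c = h
    · subst hc
      simp [ih]
      omega
    · simp [hc, Ne.symm hc, ih]

theorem chars_count_singleton (c : Char) (l : List Char) :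
    PySem.Chars.count l [c] = l.count c := by
  simp [PySem.Chars.count, go_singleton]

-- slicing commutes with map
theorem slice_map {α β : Type} (f : α → β) (l : List α) (a? b? : Option Int) :
    PySem.List.slice (l.map f) a? b? = (PySem.List.slice l a? b?).map f := by
  simp [PySem.List.slice, PySem.List.clampIdx]

-- counting '1' in the character image is counting 1 in the int list
theorem count_map_pvToCh (l : List Int) : (l.map pvToCh).count '1' = l.count 1 := by
  rw [List.count, List.count, List.countP_map]
  congr 1
  funext x
  by_cases hx : x = 1 <;> simp [pvToCh, hx]

theorem take_of_prefix {l l' : List Int} (h : l <+: l') {m : Nat} (hm : m ≤ l.length) :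
    l.take m = l'.take m := by
  obtain ⟨t, rfl⟩ := h
  rw [List.take_append_of_le_length hm]

-- ===== VERDICT (by name: the statement is the Claim_ definition above) =====
theorem magicalString_spec : Claim_equal_magicalString := by
  intro n _
  unfold Spec_magicalString magicalString magicalString_alt
  have hseed : (([1, 2, 2] : List Int).map pvToCh) = ['1', '2', '2'] := by decide
  by_cases hn : n ≤ 0
  · -- no iteration: fuel n.toNat = 0, both loops return the seed
    have h0 : n.toNat = 0 := by omega
    rw [h0]
    show (PySem.Chars.count (PySem.List.slice ['1', '2', '2'] none (some n)) ['1'] : Int)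
      = ((PySem.List.slice [1, 2, 2] none (some n)).count 1 : Int)
    rw [← hseed, slice_map, chars_count_singleton, count_map_pvToCh]
  · have hfuel : n ≤ ((pvGen 0).length : Int) + n.toNat := by
      simp [pvGen]; omega
    obtain ⟨kA, hA, hAlen⟩ := loopA_gen n n.toNat 0 hfuel
    obtain ⟨kB, hB, hBlen⟩ := loopB_gen n n.toNat 0 hfuel
    have hA0 : ((pvGen 0).map pvToCh) = ['1', '2', '2'] := by decide
    have hnum0 : (3 : Int) - (pvGen 0).getLastD 0 = 1 := by decide
    have hA' : magicalStringLoopA n.toNat ['1', '2', '2'] 2 1 n = (pvGen kA).map pvToCh := by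
      rw [← hA, hA0, hnum0]; norm_num
    have hB' : magicalStringLoopB n.toNat [1, 2, 2] n = pvGen kB := by
      have : pvGen 0 = [1, 2, 2] := rfl
      rw [← hB, this]
    rw [hA', hB']
    show (PySem.Chars.count (PySem.List.slice ((pvGen kA).map pvToCh) none (some n)) ['1'] : Int)
      = ((PySem.List.slice (pvGen kB) none (some n)).count 1 : Int)
    rw [slice_map, chars_count_singleton, count_map_pvToCh]
    congr 2
    -- both slices are the first n elements of the same infinite sequence
    have hn0 : (0:Int) ≤ n := by omega
    rw [PySem.List.slice_to _ hn0, PySem.List.slice_to _ hn0]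
    rcases Nat.le_total kA kB with hk | hk
    · exact take_of_prefix (pvGen_prefix hk) (by omega)
    · exact (take_of_prefix (pvGen_prefix hk) (by omega)).symm
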